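-- pv_equiv track=rewrite | github.com/reaganchisholm/advent-of-code | 2021/01/day1.py | countSumChanges
-- ===== SOURCE A (Python) =====
-- def countSumChanges(depths):
--     counter = 0
--     increase_count = 0
--     decrease_count = 0
--     last_sum = None
--
--     while(counter < (len(depths) - 2)):
--         current_sum = sum([int(depths[counter]), int(depths[counter+1]), int(depths[counter+2])])
--
--         if(last_sum != None):
--             if(current_sum > last_sum):
--                 increase_count += 1
--             elif(current_sum < last_sum):
--                 decrease_count += 1
--
--         last_sum = current_sum
--         counter += 1
--
--     return increase_count, decrease_count
-- ===== SOURCE B (Python) =====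
-- def countSumChanges(depths):
--     # Successive 3-window sums differ by depths[j] - depths[j-3], so compare
--     # the two elements three apart instead of maintaining a running sum.
--     increase_count = 0
--     decrease_count = 0
--     for j in range(3, len(depths)):
--         prev = int(depths[j - 3])
--         cur = int(depths[j])
--         if cur > prev:
--             increase_count += 1
--         elif cur < prev:
--             decrease_count += 1
--     return increase_count, decrease_count
-- ===== Notes on version B (the rewrite author's own statement) =====
-- stated objective: simpler
-- what changed: Drops the sliding window sums entirely: since consecutive 3-element window sums differ by depths[j]-depths[j-3], B compares single elements three apart in one plain for-loop, with no running sum or last_sum state.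
import Mathlib
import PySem

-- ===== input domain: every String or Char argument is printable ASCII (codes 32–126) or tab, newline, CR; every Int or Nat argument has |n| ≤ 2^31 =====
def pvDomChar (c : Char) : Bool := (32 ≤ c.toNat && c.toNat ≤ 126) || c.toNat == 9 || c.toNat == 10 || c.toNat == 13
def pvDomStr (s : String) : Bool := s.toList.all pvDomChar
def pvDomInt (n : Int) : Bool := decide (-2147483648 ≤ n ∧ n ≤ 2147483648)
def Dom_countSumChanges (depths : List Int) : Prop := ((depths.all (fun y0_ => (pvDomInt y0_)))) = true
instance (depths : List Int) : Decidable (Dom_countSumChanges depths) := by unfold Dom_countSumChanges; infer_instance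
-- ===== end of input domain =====

-- B replaces A's running 3-window sums by direct comparison of elements three apart (simpler, no running state).

-- ===== PORT A =====
-- depths[i]: every index A reaches is in range (0 ≤ counter < len-2), so pyGet?.getD 0 is exact there.
def pvGet (depths : List Int) (i : Int) : Int := (PySem.List.pyGet? depths i).getD 0

def pvALoop (depths : List Int) (counter inc dec : Int) (last : Option Int) : Int × Int :=
  if counter < (depths.length : Int) - 2 then
    let cur := pvGet depths counter + pvGet depths (counter + 1) + pvGet depths (counter + 2)
    let s : Int × Int :=
      match last with
      | some l => if cur > l then (inc + 1, dec) else if cur < l then (inc, dec + 1) else (inc, dec)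
      | none => (inc, dec)
    pvALoop depths (counter + 1) s.1 s.2 (some cur)
  else (inc, dec)
termination_by ((depths.length : Int) - 2 - counter).toNat
decreasing_by omega

def countSumChanges (depths : List Int) : Int × Int :=
  pvALoop depths 0 0 0 none

-- ===== PORT B =====
def pvBStep (depths : List Int) (s : Int × Int) (j : Int) : Int × Int :=
  let prev := (PySem.List.pyGet? depths (j - 3)).getD 0
  let cur := (PySem.List.pyGet? depths j).getD 0
  if cur > prev then (s.1 + 1, s.2) else if cur < prev then (s.1, s.2 + 1) else s

def countSumChanges_alt (depths : List Int) : Int × Int :=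
  (PySem.List.pyRange 3 (depths.length : Int) 1).foldl (pvBStep depths) (0, 0)

-- ===== PRECONDITION & SPEC =====
def Spec_countSumChanges (depths : List Int) (out : Int × Int) : Prop := out = countSumChanges_alt depths
instance (depths : List Int) (out : Int × Int) : Decidable (Spec_countSumChanges depths out) := by unfold Spec_countSumChanges; infer_instance

-- ===== CLAIM (what is proved, stated in full; the proofs are below) =====
def Claim_equal_countSumChanges : Prop := ∀ (depths : List Int), Dom_countSumChanges depths → Spec_countSumChanges depths (countSumChanges depths)

-- ===== LEMMAS AND PROOFS =====

-- the 3-element window sum starting at index c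
def pvW (depths : List Int) (c : Int) : Int :=
  pvGet depths c + pvGet depths (c + 1) + pvGet depths (c + 2)

lemma pvRange_empty (a b : Int) (h : b ≤ a) : PySem.List.pyRange a b 1 = [] := by
  rw [PySem.List.pyRange_one]
  have : (b - a).toNat = 0 := by omega
  simp [this]

lemma pvLoop_eq (depths : List Int) : ∀ (k : Nat) (c inc dec : Int), 1 ≤ c →
    (depths.length : Int) - 2 - c ≤ (k : Int) →
    pvALoop depths c inc dec (some (pvW depths (c - 1))) =
      (PySem.List.pyRange (c + 2) (depths.length : Int) 1).foldl (pvBStep depths) (inc, dec) := by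
  intro k
  induction k with
  | zero =>
    intro c inc dec hc hk
    rw [pvALoop, pvRange_empty _ _ (by omega)]
    simp [if_neg (by omega : ¬ c < (depths.length : Int) - 2)]
  | succ k ih =>
    intro c inc dec hc hk
    rw [pvALoop]
    by_cases h : c < (depths.length : Int) - 2
    · rw [if_pos h, PySem.List.pyRange_one_cons (by omega : c + 2 < (depths.length : Int)),
        List.foldl_cons]
      have ihx := fun i d => ih (c + 1) i d (by omega) (by omega)
      simp only [pvW, pvGet, pvBStep,
        show c - 1 + 1 = c from by omega, show c - 1 + 2 = c + 1 from by omega,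
        show c + 1 - 1 = c from by omega, show c + 1 + 2 = c + 2 + 1 from by omega,
        show c + 2 - 3 = c - 1 from by omega] at ihx ⊢
      split_ifs <;> dsimp only <;> first | exact ihx _ _ | (exfalso; omega)
    · rw [if_neg h, pvRange_empty _ _ (by omega)]
      simp

theorem countSumChanges_spec_aux (depths : List Int) :
    countSumChanges depths = countSumChanges_alt depths := by
  unfold countSumChanges countSumChanges_alt
  rw [pvALoop]
  by_cases h : (0 : Int) < (depths.length : Int) - 2
  · rw [if_pos h]
    have := pvLoop_eq depths ((depths.length : Int) - 3).toNat 1 0 0 (by omega) (by omega)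
    have h0 : (1 : Int) - 1 = 0 := by omega
    rw [h0] at this
    simpa [pvW, pvGet] using this
  · rw [if_neg h, pvRange_empty _ _ (by omega)]
    simp

-- ===== VERDICT (by name: the statement is the Claim_ definition above) =====
theorem countSumChanges_spec : Claim_equal_countSumChanges := by
  intro depths _
  unfold Spec_countSumChanges
  exact countSumChanges_spec_aux depths
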